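-- pv_equiv track=rewrite | github.com/WilliamMauclet/Connect4 | Hispida/Grid/Grid.py | four_in_a_row
-- ===== SOURCE A (Python) =====
-- def four_in_a_row(row):
--     seq = 1
--     prev = None
--     for tile in row:
--         if tile is None or tile != prev:
--             seq = 1
--         elif tile == prev:
--             seq += 1
--
--         if seq is 4:
--             return tile
--         prev = tile
--     return -1
-- ===== SOURCE B (Python) =====
-- def four_in_a_row(row):
--     # Run-length encode the row, then scan the runs for a non-None run of length >= 4.
--     runs = []  # list of [value, length], in order
--     for tile in row:
--         if runs and runs[-1][0] == tile:
--             runs[-1][1] += 1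
--         else:
--             runs.append([tile, 1])
--     for key, length in runs:
--         if key is not None and length >= 4:
--             return key
--     return -1
-- ===== Notes on version B (the rewrite author's own statement) =====
-- stated objective: alternative
-- what changed: Replaced A's single stateful scan (running seq counter and prev tile with an early return) by a two-pass run-length encoding: first build the list of maximal runs, then scan the runs for a non-None key with length >= 4.
import Mathlib
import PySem

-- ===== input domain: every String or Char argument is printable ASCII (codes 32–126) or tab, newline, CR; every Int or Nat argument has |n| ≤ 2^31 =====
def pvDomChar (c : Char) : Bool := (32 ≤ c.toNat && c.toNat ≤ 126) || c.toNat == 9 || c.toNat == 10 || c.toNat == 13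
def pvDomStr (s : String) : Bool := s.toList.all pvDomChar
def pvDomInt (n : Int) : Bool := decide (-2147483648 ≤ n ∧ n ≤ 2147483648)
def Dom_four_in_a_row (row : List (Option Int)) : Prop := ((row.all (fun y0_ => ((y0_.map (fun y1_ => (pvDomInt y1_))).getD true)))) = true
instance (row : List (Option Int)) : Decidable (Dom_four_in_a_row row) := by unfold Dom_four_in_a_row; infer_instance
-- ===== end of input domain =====

-- B replaces A's running counter/prev-state loop with a two-pass run-length encoding
-- followed by a scan of the runs (objective: alternative decomposition, same cost).

-- ===== PORT A =====
-- A's for-loop, carrying its state (seq, prev); the early 'return tile' becomes the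
-- first branch (when seq hits 4 the tile is non-None, so '.getD (-1)' is unreachable padding)
def fourLoopA (rest : List (Option Int)) (seq : Int) (prev : Option Int) : Int :=
  match rest with
  | [] => -1
  | tile :: rest' =>
    let seq' : Int := if tile = none ∨ tile ≠ prev then 1 else seq + 1
    if seq' = 4 then tile.getD (-1) else fourLoopA rest' seq' tile

def four_in_a_row (row : List (Option Int)) : Int :=
  fourLoopA row 1 none

-- ===== PORT B =====
-- first pass of Source B: the runs list is built by 'runs[-1][1] += 1 / runs.append(...)';
-- the accumulator keeps the runs REVERSED (head = the last run) and is reversed at the end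
def runStep (acc : List (Option Int × Int)) (tile : Option Int) : List (Option Int × Int) :=
  match acc with
  | (k, n) :: r => if k = tile then (k, n + 1) :: r else (tile, 1) :: (k, n) :: r
  | [] => [(tile, 1)]

-- second pass of Source B: scan the runs for a non-None key with length >= 4
def pickRun (runs : List (Option Int × Int)) : Int :=
  match runs with
  | [] => -1
  | (key, len) :: rs =>
    if key ≠ none ∧ 4 ≤ len then (match key with | some v => v | none => -1)
    else pickRun rs

def four_in_a_row_alt (row : List (Option Int)) : Int :=
  pickRun ((row.foldl runStep []).reverse)

-- ===== PRECONDITION & SPEC =====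
def Spec_four_in_a_row (row : List (Option Int)) (out : Int) : Prop := out = four_in_a_row_alt row
instance (row : List (Option Int)) (out : Int) : Decidable (Spec_four_in_a_row row out) := by unfold Spec_four_in_a_row; infer_instance

-- ===== CLAIM (what is proved, stated in full; the proofs are below) =====
def Claim_equal_four_in_a_row : Prop := ∀ (row : List (Option Int)), Dom_four_in_a_row row → Spec_four_in_a_row row (four_in_a_row row)

-- ===== LEMMAS AND PROOFS =====

-- right-recursive (foldr-style) run-length encoding, convenient for induction
def combine (k : Option Int) (n : Int) (gs : List (Option Int × Int)) : List (Option Int × Int) :=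
  match gs with
  | (k', n') :: gs' => if k' = k then (k', n' + n) :: gs' else (k, n) :: (k', n') :: gs'
  | [] => [(k, n)]

def groupsR : List (Option Int) → List (Option Int × Int)
  | [] => []
  | t :: xs => combine t 1 (groupsR xs)


theorem combine_head' (k : Option Int) (n : Int) (gs : List (Option Int × Int)) :
    ∃ m rs, combine k n gs = (k, m) :: rs := by
  unfold combine
  match gs with
  | [] => exact ⟨n, [], rfl⟩
  | (k', n') :: gs' =>
    by_cases h : k' = k
    · subst h; exact ⟨n' + n, gs', by simp⟩
    · exact ⟨n, (k', n') :: gs', by simp [h]⟩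

theorem combine_head_pos (k : Option Int) (n : Int) (gs : List (Option Int × Int))
    (h : ∀ p ∈ gs, 1 ≤ p.2) : ∃ m rs, combine k n gs = (k, m) :: rs ∧ n ≤ m := by
  unfold combine
  match gs with
  | [] => exact ⟨n, [], rfl, le_refl n⟩
  | (k', n') :: gs' =>
    by_cases hk : k' = k
    · subst hk
      refine ⟨n' + n, gs', by simp, ?_⟩
      have := h (k', n') (by simp)
      simp at this; omega
    · exact ⟨n, (k', n') :: gs', by simp [hk], le_refl n⟩

theorem groupsR_pos (xs : List (Option Int)) : ∀ p ∈ groupsR xs, 1 ≤ p.2 := by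
  induction xs with
  | nil => simp [groupsR]
  | cons t xs ih =>
    intro p hp
    rw [groupsR] at hp
    match hgs : groupsR xs with
    | [] =>
      rw [hgs] at hp; simp [combine] at hp; simp [hp]
    | (k', n') :: gs' =>
      rw [hgs] at hp
      have hk' : 1 ≤ n' := by simpa using ih (k', n') (by rw [hgs]; simp)
      by_cases h : k' = t
      · rw [show combine t 1 ((k', n') :: gs') = (k', n' + 1) :: gs' from by simp [combine, h]] at hp
        rcases List.mem_cons.mp hp with h1 | h2
        · subst h1; simp; omega
        · exact ih p (by rw [hgs]; exact List.mem_cons_of_mem _ h2)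
      · rw [show combine t 1 ((k', n') :: gs') = (t, 1) :: (k', n') :: gs' from by simp [combine, h]] at hp
        rcases List.mem_cons.mp hp with h1 | h2
        · subst h1; simp
        · exact ih p (by rw [hgs]; exact h2)

theorem combine_combine (k : Option Int) (a b : Int) (gs : List (Option Int × Int)) :
    combine k a (combine k b gs) = combine k (b + a) gs := by
  match gs with
  | [] => simp [combine]
  | (k', n') :: gs' =>
    by_cases h : k' = k
    · subst h; simp [combine, add_assoc]
    · simp [combine, h]

-- the left fold of Source B computes the reverse of groupsR
theorem foldl_runStep (xs : List (Option Int)) :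
    ∀ (k : Option Int) (n : Int) (r : List (Option Int × Int)),
      xs.foldl runStep ((k, n) :: r) = (combine k n (groupsR xs)).reverse ++ r := by
  induction xs with
  | nil => intro k n r; simp [groupsR, combine]
  | cons t xs ih =>
    intro k n r
    simp only [List.foldl_cons, runStep]
    by_cases h : k = t
    · rw [if_pos h]
      subst h
      rw [ih, groupsR, combine_combine, add_comm 1 n]
    · rw [if_neg h, ih ((t : Option Int)) 1 ((k, n) :: r)]
      rw [show groupsR (t :: xs) = combine t 1 (groupsR xs) from rfl]
      obtain ⟨m, rs, hc⟩ := combine_head' t 1 (groupsR xs)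
      rw [hc]
      simp only [combine]
      rw [if_neg (fun hh => h hh.symm)]
      simp

theorem foldl_runStep_nil (row : List (Option Int)) :
    (row.foldl runStep []).reverse = groupsR row := by
  match row with
  | [] => simp [groupsR]
  | t :: xs =>
    simp only [List.foldl_cons, runStep]
    rw [foldl_runStep xs t 1 []]
    simp [groupsR]

-- 'extend' describes A's in-progress run: prev with current length s, absorbed into the
-- head group of the remaining row when it continues it
def extend (gs : List (Option Int × Int)) (prev : Option Int) (s : Int) : List (Option Int × Int) :=
  match prev with
  | none => gs
  | some p =>
    match gs with
    | [] => []
    | (k, n) :: gs' => if k = some p then (k, n + s) :: gs' else (k, n) :: gs'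

theorem extend_head_ne (k : Option Int) (m : Int) (rs : List (Option Int × Int))
    (prev : Option Int) (s : Int) (h : prev ≠ k) :
    extend ((k, m) :: rs) prev s = (k, m) :: rs := by
  match prev with
  | none => rfl
  | some p =>
    simp only [extend]
    rw [if_neg (fun he => h (by rw [he]))]

theorem pick_combine_none (gs : List (Option Int × Int)) :
    pickRun (combine none 1 gs) = pickRun gs := by
  match gs with
  | [] => simp [combine, pickRun]
  | (k, n) :: gs' =>
    by_cases h : k = none
    · subst h
      simp [combine, pickRun]
    · simp [combine, h, pickRun]

theorem extend_combine_none (gs : List (Option Int × Int)) (prev : Option Int) (s : Int) :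
    extend (combine none 1 gs) prev s = combine none 1 gs := by
  obtain ⟨m, rs, hc⟩ := combine_head' none 1 gs
  rw [hc]
  match prev with
  | none => rfl
  | some p => simp [extend]

theorem pick_extend_combine (gs : List (Option Int × Int)) (t : Int) (s : Int) (hs : s ≤ 3) :
    pickRun (extend gs (some t) s) = pickRun (combine (some t) s gs) := by
  match gs with
  | [] =>
    simp [extend, combine, pickRun]
    intro hx; exact absurd hx (by omega)
  | (k, n) :: gs' =>
    by_cases h : k = some t
    · subst h
      simp [extend, combine]
    · simp [extend, combine, h, pickRun]
      intro hx; exact absurd hx (by omega)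

theorem pick_step (gs : List (Option Int × Int)) (p : Int) (s : Int)
    (h1 : 1 ≤ s) (h2 : s ≤ 2) :
    pickRun (extend gs (some p) (s + 1)) = pickRun (extend (combine (some p) 1 gs) (some p) s) := by
  match gs with
  | [] =>
    simp [extend, combine, pickRun]
    intro hx; exact absurd hx (by omega)
  | (k, n) :: gs' =>
    by_cases h : k = some p
    · subst h
      have he : n + 1 + s = n + (s + 1) := by ring
      simp [extend, combine, he]
    · simp [extend, combine, h, pickRun]
      intro hx; exact absurd hx (by omega)

-- the main invariant of A's loop
theorem loopA_eq_pick (rest : List (Option Int)) :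
    ∀ (prev : Option Int) (s : Int), 1 ≤ s → s ≤ 3 →
      fourLoopA rest s prev = pickRun (extend (groupsR rest) prev s) := by
  induction rest with
  | nil =>
    intro prev s h1 h3
    cases prev <;> simp [fourLoopA, groupsR, extend, pickRun]
  | cons tile rest ih =>
    intro prev s h1 h3
    cases tile with
    | none =>
      have e1 : fourLoopA (none :: rest) s prev = fourLoopA rest 1 none := by
        simp [fourLoopA]
      rw [e1, ih none 1 (le_refl 1) (by norm_num)]
      rw [show groupsR (none :: rest) = combine none 1 (groupsR rest) from rfl]
      rw [extend_combine_none, pick_combine_none]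
      rfl
    | some t =>
      by_cases hp : (some t : Option Int) = prev
      · subst hp
        by_cases h4 : s + 1 = 4
        · have e1 : fourLoopA (some t :: rest) s (some t) = t := by
            simp [fourLoopA, h4]
          rw [e1]
          obtain ⟨m, rs, hcomb, hm⟩ := combine_head_pos (some t) 1 (groupsR rest) (groupsR_pos rest)
          rw [show groupsR (some t :: rest) = combine (some t) 1 (groupsR rest) from rfl, hcomb]
          rw [show extend ((some t, m) :: rs) (some t) s = (some t, m + s) :: rs from by simp [extend]]
          have hok : ((some t : Option Int) ≠ none ∧ 4 ≤ m + s) := ⟨by simp, by omega⟩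
          simp only [pickRun]
          rw [if_pos hok]
        · have e1 : fourLoopA (some t :: rest) s (some t) = fourLoopA rest (s + 1) (some t) := by
            simp [fourLoopA, h4]
          rw [e1, ih (some t) (s + 1) (by omega) (by omega)]
          rw [show groupsR (some t :: rest) = combine (some t) 1 (groupsR rest) from rfl]
          exact pick_step (groupsR rest) t s h1 (by omega)
      · have e1 : fourLoopA (some t :: rest) s prev = fourLoopA rest 1 (some t) := by
          simp [fourLoopA, hp]
        rw [e1, ih (some t) 1 (le_refl 1) (by norm_num)]
        rw [show groupsR (some t :: rest) = combine (some t) 1 (groupsR rest) from rfl]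
        obtain ⟨m, rs, hcomb⟩ := combine_head' (some t) 1 (groupsR rest)
        rw [hcomb, extend_head_ne (some t) m rs prev s (fun he => hp he.symm), ← hcomb]
        exact pick_extend_combine (groupsR rest) t 1 (by norm_num)

-- ===== VERDICT (by name: the statement is the Claim_ definition above) =====
theorem four_in_a_row_spec : Claim_equal_four_in_a_row := by
  intro row _
  unfold Spec_four_in_a_row four_in_a_row four_in_a_row_alt
  rw [foldl_runStep_nil, loopA_eq_pick row none 1 (by norm_num) (by norm_num)]
  rfl
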